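-- pv_equiv track=rewrite | github.com/Vakihito/SentimentYoutube | SentimentYoutube/utils.py | consent_values
-- ===== SOURCE A (Python) =====
-- def consent_values(sentiment_list):
--     lista_sent = sentiment_list
--     size_lista = len(lista_sent)
--     for i in range(size_lista):
--         for j in range(size_lista):
--             if (i != j and (lista_sent[i] * lista_sent[j] < 0)):
--                 return 0
--     return sum(lista_sent)
-- ===== SOURCE B (Python) =====
-- def consent_values(sentiment_list):
--     has_pos = False
--     has_neg = False
--     for x in sentiment_list:
--         if x > 0:
--             has_pos = True
--         elif x < 0:
--             has_neg = True
--     if has_pos and has_neg: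
--         return 0
--     return sum(sentiment_list)
-- ===== Notes on version B (the rewrite author's own statement) =====
-- stated objective: faster
-- what changed: Replaced the quadratic all-pairs product scan with a single pass that tracks whether a positive and a negative element are both present, returning 0 in that case and the sum otherwise.
import Mathlib
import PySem

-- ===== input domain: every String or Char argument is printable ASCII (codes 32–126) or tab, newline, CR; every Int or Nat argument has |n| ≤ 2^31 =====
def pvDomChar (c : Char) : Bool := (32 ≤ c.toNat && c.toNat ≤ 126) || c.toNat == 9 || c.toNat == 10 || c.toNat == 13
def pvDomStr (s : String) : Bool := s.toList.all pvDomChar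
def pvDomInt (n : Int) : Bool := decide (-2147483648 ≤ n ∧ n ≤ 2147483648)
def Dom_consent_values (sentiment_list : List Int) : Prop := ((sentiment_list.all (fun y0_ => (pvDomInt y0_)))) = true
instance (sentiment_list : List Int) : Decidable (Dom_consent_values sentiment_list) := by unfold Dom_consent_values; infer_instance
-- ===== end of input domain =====

-- B changes A's quadratic all-pairs sign scan into one linear pass tracking the presence of a positive and of a negative element (objective: faster).

-- ===== PORT A =====
-- nested 'for i / for j' with an early 'return 0', as findSome? over the two ranges
def consent_values (sentiment_list : List Int) : Int :=
  let lista_sent := sentiment_list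
  let size_lista : Int := lista_sent.length
  match (PySem.List.pyRange 0 size_lista 1).findSome? (fun i =>
          (PySem.List.pyRange 0 size_lista 1).findSome? (fun j =>
            if i ≠ j ∧ PySem.List.pyGetD lista_sent i 0 * PySem.List.pyGetD lista_sent j 0 < 0
            then some (0 : Int) else none)) with
  | some v => v
  | none => lista_sent.sum

-- ===== PORT B =====
def consent_values_alt (sentiment_list : List Int) : Int :=
  let st := sentiment_list.foldl
    (fun (p : Bool × Bool) x => if x > 0 then (true, p.2) else if x < 0 then (p.1, true) else p)
    (false, false)
  if st.1 ∧ st.2 then 0 else sentiment_list.sum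

-- ===== PRECONDITION & SPEC =====
def Spec_consent_values (sentiment_list : List Int) (out : Int) : Prop := out = consent_values_alt sentiment_list
instance (sentiment_list : List Int) (out : Int) : Decidable (Spec_consent_values sentiment_list out) := by unfold Spec_consent_values; infer_instance

-- ===== CLAIM (what is proved, stated in full; the proofs are below) =====
def Claim_equal_consent_values : Prop := ∀ (sentiment_list : List Int), Dom_consent_values sentiment_list → Spec_consent_values sentiment_list (consent_values sentiment_list)

-- ===== LEMMAS AND PROOFS =====

theorem findSome?_if_const {α : Type} (p : α → Prop) [DecidablePred p] (c : Int) (xs : List α) :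
    xs.findSome? (fun x => if p x then some c else none)
      = if xs.any (fun x => decide (p x)) then some c else none := by
  induction xs with
  | nil => simp [List.findSome?]
  | cons a t ih =>
    by_cases h : p a <;> simp [List.findSome?, h, ih]

theorem foldl_flags (l : List Int) (p q : Bool) :
    l.foldl (fun (p : Bool × Bool) x => if x > 0 then (true, p.2) else if x < 0 then (p.1, true) else p) (p, q)
      = (p || l.any (fun x => decide (0 < x)), q || l.any (fun x => decide (x < 0))) := by
  induction l generalizing p q with
  | nil => simp
  | cons a t ih =>
    by_cases h1 : (0:Int) < a
    · simp [h1, ih, show ¬ a < 0 by omega]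
    · by_cases h2 : a < 0 <;> simp [h1, h2, ih]

theorem pair_iff (l : List Int) :
    ((PySem.List.pyRange 0 (l.length : Int) 1).any (fun i =>
       (PySem.List.pyRange 0 (l.length : Int) 1).any (fun j =>
         decide (i ≠ j ∧ PySem.List.pyGetD l i 0 * PySem.List.pyGetD l j 0 < 0))))
    = (l.any (fun x => decide (0 < x)) && l.any (fun x => decide (x < 0))) := by
  rcases Bool.eq_false_or_eq_true (l.any (fun x => decide (0 < x)) && l.any (fun x => decide (x < 0))) with hrhs | hrhs
  · rw [hrhs]
    simp only [Bool.and_eq_true, List.any_eq_true, decide_eq_true_eq] at hrhs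
    obtain ⟨⟨x, hx, hxp⟩, ⟨y, hy, hyn⟩⟩ := hrhs
    obtain ⟨ix, hix, hgx⟩ := List.mem_iff_getElem.mp hx
    obtain ⟨iy, hiy, hgy⟩ := List.mem_iff_getElem.mp hy
    rw [List.any_eq_true]
    refine ⟨(ix : Int), ?_, ?_⟩
    · rw [PySem.List.mem_pyRange_one]; omega
    rw [List.any_eq_true]
    refine ⟨(iy : Int), ?_, ?_⟩
    · rw [PySem.List.mem_pyRange_one]; omega
    have e1 : PySem.List.pyGetD l (ix : Int) 0 = x := by
      simp only [PySem.List.pyGetD_natCast]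
      rw [List.getD_eq_getElem _ _ hix]
      exact hgx
    have e2 : PySem.List.pyGetD l (iy : Int) 0 = y := by
      simp only [PySem.List.pyGetD_natCast]
      rw [List.getD_eq_getElem _ _ hiy]
      exact hgy
    have hne : (ix : Int) ≠ (iy : Int) := by
      intro h
      rw [h, e2] at e1
      omega
    simp only [decide_eq_true_eq]
    exact ⟨hne, by rw [e1, e2]; nlinarith⟩

  · rw [hrhs]
    simp only [List.any_eq_false]
    intro i hi hin
    rw [List.any_eq_true] at hin
    obtain ⟨j, hj, hP⟩ := hin
    simp only [decide_eq_true_eq] at hP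
    obtain ⟨hij, hlt⟩ := hP
    rw [PySem.List.mem_pyRange_one] at hi hj
    have hgi : PySem.List.pyGetD l i 0 ∈ l :=
      PySem.List.pyGetD_mem _ _ (by constructor <;> omega)
    have hgj : PySem.List.pyGetD l j 0 ∈ l :=
      PySem.List.pyGetD_mem _ _ (by constructor <;> omega)
    simp only [Bool.and_eq_false_iff, List.any_eq_false, decide_eq_true_eq, not_lt] at hrhs
    rcases hrhs with h | h
    · have h1 := h _ hgi
      have h2 := h _ hgj
      nlinarith
    · have h1 := h _ hgi
      have h2 := h _ hgj
      nlinarith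

theorem findSome?_nested {α β : Type} (P : α → β → Prop) [∀ a b, Decidable (P a b)]
    (c : Int) (xs : List α) (ys : List β) :
    xs.findSome? (fun i => ys.findSome? (fun j => if P i j then some c else none))
      = if xs.any (fun i => ys.any (fun j => decide (P i j))) then some c else none := by
  induction xs with
  | nil => simp [List.findSome?]
  | cons a t ih =>
    rw [List.findSome?_cons, findSome?_if_const (P a) c ys]
    by_cases h : ys.any (fun j => decide (P a j)) = true
    · simp [h]
    · simp only [Bool.not_eq_true] at h
      simp [h, ih]

-- ===== VERDICT (by name: the statement is the Claim_ definition above) =====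
theorem consent_values_spec : Claim_equal_consent_values := by
  intro l _
  unfold Spec_consent_values consent_values consent_values_alt
  simp only []
  rw [foldl_flags, findSome?_nested
    (fun i j => i ≠ j ∧ PySem.List.pyGetD l i 0 * PySem.List.pyGetD l j 0 < 0) 0,
    pair_iff]
  cases hp : l.any (fun x => decide (0 < x)) <;>
    cases hn : l.any (fun x => decide (x < 0)) <;> simp
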